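-- pv_equiv track=rewrite | github.com/cyhuang76/alice-gamma-net | paper/scripts/md2nature.py | _protect_math_pipes
-- ===== SOURCE A (Python) =====
-- def _protect_math_pipes(line: str) -> str:
--     """Replace | inside $...$ with placeholder so table split works."""
--     result = []
--     in_math = False
--     i = 0
--     while i < len(line):
--         ch = line[i]
--         if ch == "$":
--             in_math = not in_math
--             result.append(ch)
--         elif ch == "|" and in_math:
--             result.append("\x00PIPE\x00")
--         else:
--             result.append(ch)
--         i += 1
--     return "".join(result)
-- ===== SOURCE B (Python) =====
-- def _protect_math_pipes(line: str) -> str: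
--     """Replace | inside $...$ with placeholder so table split works.
--
--     Split on '$': odd-indexed segments are inside math, so replace their
--     pipes; rejoin with '$'.
--     """
--     parts = line.split("$")
--     return "$".join(
--         p.replace("|", "\x00PIPE\x00") if i % 2 == 1 else p
--         for i, p in enumerate(parts)
--     )
-- ===== Notes on version B (the rewrite author's own statement) =====
-- stated objective: faster
-- what changed: Replaces the per-character state-machine loop with a split on the dollar sign, a pipe-replace on the odd-indexed (inside-math) segments, and a rejoin.
import Mathlib
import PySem

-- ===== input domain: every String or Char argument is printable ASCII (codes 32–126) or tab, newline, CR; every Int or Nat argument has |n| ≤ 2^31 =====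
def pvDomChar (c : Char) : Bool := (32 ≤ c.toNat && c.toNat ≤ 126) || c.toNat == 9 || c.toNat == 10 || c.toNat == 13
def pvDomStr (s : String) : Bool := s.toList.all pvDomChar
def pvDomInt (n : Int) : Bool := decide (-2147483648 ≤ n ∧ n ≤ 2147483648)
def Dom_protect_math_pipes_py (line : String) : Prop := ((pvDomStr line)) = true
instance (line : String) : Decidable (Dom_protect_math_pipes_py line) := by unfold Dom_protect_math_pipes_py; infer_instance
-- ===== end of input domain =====

-- B replaces A's per-character state-machine loop by: split on the dollar sign,
-- replace pipes in the odd-indexed (inside-math) segments, rejoin (measured faster).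

-- the placeholder "\x00PIPE\x00" as a character list
def pvPipeTok : List Char := ['\x00', 'P', 'I', 'P', 'E', '\x00']

-- ===== PORT A =====
-- A's while loop over the characters, carrying the in_math flag; the appended
-- pieces are emitted in order (join of the result list).
def pvAGo : List Char → Bool → List Char
  | [], _ => []
  | c :: rest, inMath =>
    if c == '$' then c :: pvAGo rest (!inMath)
    else if c == '|' && inMath then pvPipeTok ++ pvAGo rest inMath
    else c :: pvAGo rest inMath

def protect_math_pipes_py (line : String) : String :=
  String.ofList (pvAGo line.toList false)

-- ===== PORT B =====
-- segment transformer of Source B's comprehension: odd index → replace pipes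
def pvBSeg (i : Int) (s : List Char) : List Char :=
  if i % 2 == 1 then PySem.Chars.replace s ['|'] pvPipeTok else s

def protect_math_pipes_py_alt (line : String) : String :=
  String.ofList (PySem.Chars.join ['$']
    ((PySem.List.enumerate (PySem.Chars.splitOn line.toList ['$'])).map
      (fun p => pvBSeg p.1 p.2)))

-- ===== PRECONDITION & SPEC =====
def Spec_protect_math_pipes_py (line : String) (out : String) : Prop := out = protect_math_pipes_py_alt line
instance (line : String) (out : String) : Decidable (Spec_protect_math_pipes_py line out) := by unfold Spec_protect_math_pipes_py; infer_instance

-- ===== CLAIM (what is proved, stated in full; the proofs are below) =====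
def Claim_equal_protect_math_pipes_py : Prop := ∀ (line : String), Dom_protect_math_pipes_py line → Spec_protect_math_pipes_py line (protect_math_pipes_py line)

-- ===== LEMMAS AND PROOFS =====

-- reference split on '$' (proof-side characterization of Chars.splitOn)
def pvSplit : List Char → List (List Char)
  | [] => [[]]
  | c :: cs =>
    if c == '$' then [] :: pvSplit cs
    else match pvSplit cs with
      | [] => [[c]]
      | s :: ss => (c :: s) :: ss

-- reference pipe replacement (proof-side characterization of Chars.replace)
def pvRepl : List Char → List Char
  | [] => []
  | c :: cs => if c == '|' then pvPipeTok ++ pvRepl cs else c :: pvRepl cs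

-- alternate-parity map over the segments, flag = "inside math"
def pvAlt : List (List Char) → Bool → List (List Char)
  | [], _ => []
  | s :: ss, b => (if b then pvRepl s else s) :: pvAlt ss (!b)

theorem pvSplit_ne_nil (cs : List Char) : pvSplit cs ≠ [] := by
  cases cs with
  | nil => simp [pvSplit]
  | cons c cs =>
    simp only [pvSplit]
    split
    · simp
    · split <;> simp

theorem pvSplit_go (fuel : Nat) (cs cur : List Char) (acc : List (List Char))
    (h : cs.length ≤ fuel) :
    PySem.Chars.splitOn.go ['$'] fuel cs cur acc =
      acc.reverse ++ (match pvSplit cs with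
        | [] => [cur.reverse]
        | s :: ss => (cur.reverse ++ s) :: ss) := by
  induction fuel generalizing cs cur acc with
  | zero =>
    have : cs = [] := by cases cs <;> simp_all
    subst this
    simp [PySem.Chars.splitOn.go, pvSplit]
  | succ fuel ih =>
    cases cs with
    | nil => simp [PySem.Chars.splitOn.go, pvSplit]
    | cons c rest =>
      have hr : rest.length ≤ fuel := by simpa using h
      by_cases hc : c = '$'
      · subst hc
        rw [show PySem.Chars.splitOn.go ['$'] (fuel + 1) ('$' :: rest) cur acc =
              PySem.Chars.splitOn.go ['$'] fuel rest [] (cur.reverse :: acc) by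
            rw [PySem.Chars.splitOn.go.eq_def]; simp [List.isPrefixOf]]
        rw [ih rest [] (cur.reverse :: acc) hr]
        have hne := pvSplit_ne_nil rest
        cases hs : pvSplit rest with
        | nil => exact absurd hs hne
        | cons s ss => simp [pvSplit, hs]
      · rw [show PySem.Chars.splitOn.go ['$'] (fuel + 1) (c :: rest) cur acc =
              PySem.Chars.splitOn.go ['$'] fuel rest (c :: cur) acc by
            rw [PySem.Chars.splitOn.go.eq_def]; simp [List.isPrefixOf, Ne.symm hc]]
        rw [ih rest (c :: cur) acc hr]
        have hne := pvSplit_ne_nil rest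
        simp only [pvSplit, beq_iff_eq, hc, if_false]
        cases hs : pvSplit rest with
        | nil => exact absurd hs hne
        | cons s ss => simp

theorem pvSplit_eq (cs : List Char) :
    PySem.Chars.splitOn cs ['$'] = pvSplit cs := by
  unfold PySem.Chars.splitOn
  rw [pvSplit_go (cs.length + 1) cs [] [] (by omega)]
  have hne := pvSplit_ne_nil cs
  cases hs : pvSplit cs with
  | nil => exact absurd hs hne
  | cons s ss => simp

theorem pvRepl_go (fuel : Nat) (cs acc : List Char) (h : cs.length ≤ fuel) :
    PySem.Chars.replace.go ['|'] pvPipeTok fuel cs acc = acc.reverse ++ pvRepl cs := by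
  induction fuel generalizing cs acc with
  | zero =>
    have : cs = [] := by cases cs <;> simp_all
    subst this
    simp [PySem.Chars.replace.go, pvRepl]
  | succ fuel ih =>
    cases cs with
    | nil => simp [PySem.Chars.replace.go, pvRepl]
    | cons c rest =>
      have hr : rest.length ≤ fuel := by simpa using h
      by_cases hc : c = '|'
      · subst hc
        rw [show PySem.Chars.replace.go ['|'] pvPipeTok (fuel + 1) ('|' :: rest) acc =
              PySem.Chars.replace.go ['|'] pvPipeTok fuel rest (pvPipeTok.reverse ++ acc) by
            rw [PySem.Chars.replace.go.eq_def]; simp [List.isPrefixOf]]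
        rw [ih rest _ hr]
        simp [pvRepl]
      · rw [show PySem.Chars.replace.go ['|'] pvPipeTok (fuel + 1) (c :: rest) acc =
              PySem.Chars.replace.go ['|'] pvPipeTok fuel rest (c :: acc) by
            rw [PySem.Chars.replace.go.eq_def]; simp [List.isPrefixOf, Ne.symm hc]]
        rw [ih rest _ hr]
        simp [pvRepl, hc]

theorem pvRepl_eq (cs : List Char) :
    PySem.Chars.replace cs ['|'] pvPipeTok = pvRepl cs := by
  unfold PySem.Chars.replace
  simp only [List.isEmpty_cons, if_false, Bool.false_eq_true]
  exact pvRepl_go cs.length cs [] (le_refl _)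

theorem pvEnum_alt (segs : List (List Char)) (k : Int) (hk : 0 ≤ k) :
    (PySem.List.enumerate segs k).map (fun p => pvBSeg p.1 p.2) =
      pvAlt segs (k % 2 == 1) := by
  induction segs generalizing k with
  | nil => simp [PySem.List.enumerate, pvAlt]
  | cons s ss ih =>
    have h1 : pvBSeg k s = if (k % 2 == 1) then pvRepl s else s := by
      simp only [pvBSeg, pvRepl_eq]
    have h2 : ((k + 1) % 2 == 1) = !(k % 2 == 1) := by
      rcases Int.emod_two_eq k with h | h <;> simp [Int.add_emod, h]
    simp only [PySem.List.enumerate, List.map_cons, pvAlt, h1,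
      ih (k + 1) (by omega), h2]

theorem pv_intercalate_cons_cons (sep a b : List Char) (t : List (List Char)) :
    List.intercalate sep (a :: b :: t) = a ++ sep ++ List.intercalate sep (b :: t) := by
  simp [List.intercalate, List.intersperse]

theorem pv_main (cs : List Char) (m : Bool) :
    pvAGo cs m = List.intercalate ['$'] (pvAlt (pvSplit cs) m) := by
  induction cs generalizing m with
  | nil => simp [pvAGo, pvSplit, pvAlt, pvRepl, List.intercalate]
  | cons c rest ih =>
    have hne := pvSplit_ne_nil rest
    obtain ⟨s, ss, hs⟩ : ∃ s ss, pvSplit rest = s :: ss := by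
      cases h : pvSplit rest with
      | nil => exact absurd h hne
      | cons s ss => exact ⟨s, ss, rfl⟩
    by_cases hc : c = '$'
    · subst hc
      simp only [pvAGo, beq_self_eq_true, if_true, pvSplit, hs, pvAlt]
      have he : (if m = true then pvRepl [] else []) = ([] : List Char) := by
        cases m <;> simp [pvRepl]
      rw [he, pv_intercalate_cons_cons, ih (!m), hs]
      simp [pvAlt]
    · have hl : pvAGo (c :: rest) m =
          (if c == '|' && m then pvPipeTok else [c]) ++ pvAGo rest m := by
        simp only [pvAGo, beq_iff_eq, hc, if_false]
        by_cases hp : (c == '|' && m) = true <;> simp [hp]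
      have hhead : (if m = true then pvRepl (c :: s) else c :: s) =
          (if c == '|' && m then pvPipeTok else [c]) ++ (if m = true then pvRepl s else s) := by
        cases m with
        | false => simp
        | true =>
          simp only [if_true, Bool.and_true, pvRepl]
          by_cases hp : (c == '|') = true <;> simp [hp]
      rw [hl, ih m, hs]
      simp only [pvSplit, beq_iff_eq, hc, if_false, hs, pvAlt, hhead]
      cases ss with
      | nil => simp [pvAlt, List.intercalate]
      | cons b t =>
        simp only [pvAlt]
        rw [pv_intercalate_cons_cons, pv_intercalate_cons_cons]
        simp

-- ===== VERDICT (by name: the statement is the Claim_ definition above) =====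
theorem protect_math_pipes_py_spec : Claim_equal_protect_math_pipes_py := by
  intro line _
  unfold Spec_protect_math_pipes_py protect_math_pipes_py protect_math_pipes_py_alt
  rw [pvSplit_eq, pvEnum_alt _ 0 (by omega)]
  have h0 : ((0 : Int) % 2 == 1) = false := by decide
  rw [h0, PySem.Chars.join, ← pv_main]
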